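-- pv_equiv track=rewrite | github.com/JohnAsaro/Summer-Research-Voting-2024 | greatest_θ_winner/other_voting_rules.py | borda_k_2
-- ===== SOURCE A (Python) =====
-- def borda_k_2(candidates, ballots, vote_counts): #As far as I am aware, you can't use borda on datasets where not every ballots ranks every candidate, meaning for the NYC and minneapolis data this cannot be used
--     #Input:
--     #candidates - an array of each candidate
--     #ballots - an array of each ballot, ballots cannot include candidates that do not appear in "candidates"
--     #vote_counts - an array of the same length as "ballots", if each individual ballot is included in "ballots", each
--     #member of vote_counts should be 1, if the data is aggregated, then the count should be equal to the amount of times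
--     #that exact ballot appeared in the raw data
--
--     #A1: Initialize a dictionary to store Borda points for each candidate
--     borda_tally = {candidate: 0 for candidate in candidates}
--     num_candidates = len(candidates)
--
--     #A2: Assign Borda points based on rankings in each ballot
--     for ballot, count in zip(ballots, vote_counts):
--         for rank, candidate in enumerate(ballot):
--             #Borda point: num_candidates - rank (higher rank means fewer points)
--             borda_tally[candidate] += (num_candidates - rank) * count
--
--     #A3: Sort candidates by Borda points in descending order
--     sorted_candidates = sorted(borda_tally.items(), key=lambda item: item[1], reverse=True)
--
--     #A4: Return the top 2 candidates
--     top_2_candidates = [candidate[0] for candidate in sorted_candidates[:2]]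
--
--     return top_2_candidates
-- ===== SOURCE B (Python) =====
-- def borda_k_2(candidates, ballots, vote_counts):
--     # Same tally as A; top-2 selection by one linear scan (best/second) instead of sorting.
--     borda_tally = {candidate: 0 for candidate in candidates}
--     num_candidates = len(candidates)
--     for ballot, count in zip(ballots, vote_counts):
--         for rank, candidate in enumerate(ballot):
--             borda_tally[candidate] += (num_candidates - rank) * count
--     best = None
--     second = None
--     for cand, score in borda_tally.items():
--         if best is None or score > best[1]:
--             second = best
--             best = (cand, score)
--         elif second is None or score > second[1]:
--             second = (cand, score)
--     result = []
--     if best is not None: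
--         result.append(best[0])
--     if second is not None:
--         result.append(second[0])
--     return result
-- ===== Notes on version B (the rewrite author's own statement) =====
-- stated objective: alternative
-- what changed: Keeps A's tally loop but replaces sorting all candidates by score and slicing the top 2 with a single scan over the tally that maintains (best, second) pairs using strict '>' so ties keep the stable sort's insertion order.
import Mathlib
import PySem

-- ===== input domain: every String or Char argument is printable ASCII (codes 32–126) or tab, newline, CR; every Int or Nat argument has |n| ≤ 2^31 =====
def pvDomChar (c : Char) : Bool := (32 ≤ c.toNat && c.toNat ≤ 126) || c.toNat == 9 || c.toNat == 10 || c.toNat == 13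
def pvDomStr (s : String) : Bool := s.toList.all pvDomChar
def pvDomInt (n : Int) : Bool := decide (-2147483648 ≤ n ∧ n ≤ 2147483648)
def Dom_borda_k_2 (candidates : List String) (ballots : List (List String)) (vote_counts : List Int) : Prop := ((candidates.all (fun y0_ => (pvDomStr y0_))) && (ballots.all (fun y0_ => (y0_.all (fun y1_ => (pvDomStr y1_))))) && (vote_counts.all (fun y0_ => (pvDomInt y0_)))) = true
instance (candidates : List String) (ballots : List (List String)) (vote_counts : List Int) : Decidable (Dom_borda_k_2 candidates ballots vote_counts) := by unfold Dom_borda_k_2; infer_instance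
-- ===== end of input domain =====

-- B replaces A's sort-then-slice top-2 extraction by a single best/second scan over the tally
-- (same tally loop, strict '>' preserves the stable sort's tie order); objective: alternative.

-- ===== PORT A =====
-- shared tally loop: both Pythons build borda_tally with literally this code
def pvTally (candidates : List String) (ballots : List (List String)) (vote_counts : List Int) : PySem.Dict String Int :=
  let init : PySem.Dict String Int := candidates.foldl (fun d c => d.insert c 0) PySem.Dict.empty
  let num_candidates : Int := candidates.length
  (ballots.zip vote_counts).foldl (fun d bc =>
    (PySem.List.enumerate bc.1).foldl (fun d rc =>
      -- Python: borda_tally[candidate] += …  (KeyError on an unknown candidate — excluded by Pre_);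
      -- modify with default 0 agrees wherever the Python returns
      d.modify rc.2 0 (· + (num_candidates - rc.1) * bc.2)) d) init

def borda_k_2 (candidates : List String) (ballots : List (List String)) (vote_counts : List Int) : List String :=
  let sorted_candidates := PySem.List.sorted (pvTally candidates ballots vote_counts).items (fun item => item.2) true
  (sorted_candidates.take 2).map (fun candidate => candidate.1)

-- ===== PORT B =====
-- one step of B's best/second scan
def pvScanStep (st : Option (String × Int) × Option (String × Int)) (x : String × Int) :
    Option (String × Int) × Option (String × Int) :=
  match st.1 with
  | none => (some x, st.2)
  | some b =>
    if x.2 > b.2 then (some x, some b)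
    else
      match st.2 with
      | none => (st.1, some x)
      | some s => if x.2 > s.2 then (st.1, some x) else st

def borda_k_2_alt (candidates : List String) (ballots : List (List String)) (vote_counts : List Int) : List String :=
  let st := (pvTally candidates ballots vote_counts).items.foldl pvScanStep (none, none)
  let result : List String := []
  let result := match st.1 with | some b => result ++ [b.1] | none => result
  match st.2 with | some s => result ++ [s.1] | none => result

-- ===== PRECONDITION & SPEC =====
-- Pre_ excludes exactly the inputs where A raises KeyError: a processed ballot naming a candidate not in `candidates`.
def Pre_borda_k_2 (candidates : List String) (ballots : List (List String)) (vote_counts : List Int) : Prop :=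
  ∀ p ∈ ballots.zip vote_counts, ∀ cand ∈ p.1, cand ∈ candidates
instance (candidates : List String) (ballots : List (List String)) (vote_counts : List Int) : Decidable (Pre_borda_k_2 candidates ballots vote_counts) := by unfold Pre_borda_k_2; infer_instance
def pvWitness_borda_k_2 : List String × List (List String) × List Int :=
  (["a", "b", "c"], [["a", "b", "c"], ["b", "a", "c"]], [1, 2])
def Spec_borda_k_2 (candidates : List String) (ballots : List (List String)) (vote_counts : List Int) (out : List String) : Prop := out = borda_k_2_alt candidates ballots vote_counts
instance (candidates : List String) (ballots : List (List String)) (vote_counts : List Int) (out : List String) : Decidable (Spec_borda_k_2 candidates ballots vote_counts out) := by unfold Spec_borda_k_2; infer_instance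

-- ===== CLAIM (what is proved, stated in full; the proofs are below) =====
def Claim_equal_borda_k_2 : Prop := ∀ (candidates : List String) (ballots : List (List String)) (vote_counts : List Int), Dom_borda_k_2 candidates ballots vote_counts → Pre_borda_k_2 candidates ballots vote_counts → Spec_borda_k_2 candidates ballots vote_counts (borda_k_2 candidates ballots vote_counts)

-- ===== LEMMAS AND PROOFS =====

-- first two elements of a list, as B's (best, second) state
def pvTop2 (s : List (String × Int)) : Option (String × Int) × Option (String × Int) :=
  match s with
  | [] => (none, none)
  | [a] => (some a, none)
  | a :: b :: _ => (some a, some b)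

-- one scan step simulates one insertion step of the stable reverse insertion sort, on the first two slots
theorem pvScanStep_insertBy (x : String × Int) (s : List (String × Int)) :
    pvScanStep (pvTop2 s) x
      = pvTop2 (PySem.List.insertBy (fun a b => decide ((b.2 : Int) < a.2)) x s) := by
  match s with
  | [] => rfl
  | [a] =>
    simp only [pvTop2, pvScanStep, PySem.List.insertBy]
    by_cases h : (a.2 : Int) < x.2 <;> simp [h]
  | a :: b :: t =>
    simp only [pvTop2, pvScanStep, PySem.List.insertBy]
    by_cases h1 : (a.2 : Int) < x.2
    · simp [h1]
    · by_cases h2 : (b.2 : Int) < x.2 <;> simp [h1, h2]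

-- B's whole scan computes the first two elements of the reverse-sorted list
theorem pvScan_eq_top2_sorted (l : List (String × Int)) :
    l.foldl pvScanStep (none, none) = pvTop2 (PySem.List.sorted l (fun p => p.2) true) := by
  rw [PySem.List.sorted_rev_eq_foldl_insertBy]
  induction l using List.reverseRecOn with
  | nil => rfl
  | append_singleton l x ih =>
    rw [List.foldl_append, List.foldl_append]
    simp only [List.foldl_cons, List.foldl_nil, ih]
    exact pvScanStep_insertBy x _

theorem borda_k_2_spec' (candidates : List String) (ballots : List (List String)) (vote_counts : List Int) :
    borda_k_2 candidates ballots vote_counts = borda_k_2_alt candidates ballots vote_counts := by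
  unfold borda_k_2 borda_k_2_alt
  rw [pvScan_eq_top2_sorted]
  cases h : PySem.List.sorted (pvTally candidates ballots vote_counts).items (fun p => p.2) true with
  | nil => simp [pvTop2]
  | cons a t =>
    cases t with
    | nil => simp [pvTop2]
    | cons b t' => simp [pvTop2]

-- ===== VERDICT (by name: the statement is the Claim_ definition above) =====
theorem borda_k_2_spec : Claim_equal_borda_k_2 := by
  intro candidates ballots vote_counts _ _
  unfold Spec_borda_k_2
  exact borda_k_2_spec' candidates ballots vote_counts
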